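-- pv_equiv track=rewrite | github.com/satojkovic/algorithms | kickstart/2021/RoundA/l_shape.py | cumsum_matrix
-- ===== SOURCE A (Python) =====
-- def cumsum_matrix(mat):
--     rows, cols = len(mat), len(mat[0])
--     cumsum_mat = [[0] * cols for _ in range(rows)]
--     for r in range(rows):
--         for c in range(cols):
--             cumsum_mat[r][c] = cumsum_mat[r][c-1] + mat[r][c] \
--                 if c != 0 else mat[r][c]
--     return cumsum_mat
-- ===== SOURCE B (Python) =====
-- def cumsum_matrix(mat):
--     rows, cols = len(mat), len(mat[0])
--     return [[sum(mat[r][:c + 1]) for c in range(cols)] for r in range(rows)]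
-- ===== Notes on version B (the rewrite author's own statement) =====
-- stated objective: simpler
-- what changed: Replaces A's in-place running-total accumulation over a preallocated zero matrix (each cell = previous cell + entry) with a direct per-cell prefix-slice sum comprehension (each cell = sum of the row prefix).
import Mathlib
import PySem

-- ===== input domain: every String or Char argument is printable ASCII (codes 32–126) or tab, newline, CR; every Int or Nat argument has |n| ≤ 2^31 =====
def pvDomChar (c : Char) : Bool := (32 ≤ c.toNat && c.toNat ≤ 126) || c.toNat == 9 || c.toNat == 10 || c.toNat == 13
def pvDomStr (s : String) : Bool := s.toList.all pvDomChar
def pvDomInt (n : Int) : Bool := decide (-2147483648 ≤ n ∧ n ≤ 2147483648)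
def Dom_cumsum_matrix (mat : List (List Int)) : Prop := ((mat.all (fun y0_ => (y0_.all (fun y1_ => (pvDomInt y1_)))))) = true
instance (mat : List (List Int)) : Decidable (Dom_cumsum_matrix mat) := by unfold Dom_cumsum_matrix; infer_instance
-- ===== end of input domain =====

-- B replaces A's in-place running-total accumulation with a per-cell prefix-slice sum (simpler, not faster).

-- ===== PORT A =====
-- Literal port of A: preallocate a rows×cols zero matrix, then for each r, for each c,
-- cumsum_mat[r][c] = cumsum_mat[r][c-1] + mat[r][c] if c != 0 else mat[r][c].
-- Indexing mat[r][c] is written with getD 0; under Pre_ (each row has ≥ cols entries,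
-- mat nonempty) every index is in range, so this is exact where Python A returns.
def cumsum_matrix (mat : List (List Int)) : List (List Int) :=
  let rows := mat.length
  let cols := (mat.headD []).length
  let init : List (List Int) := List.replicate rows (List.replicate cols 0)
  (List.range rows).foldl (fun cm r =>
    (List.range cols).foldl (fun cm c =>
      cm.set r ((cm.getD r []).set c
        (if c ≠ 0 then (cm.getD r []).getD (c-1) 0 + (mat.getD r []).getD c 0
         else (mat.getD r []).getD c 0))) cm) init

-- ===== PORT B =====
-- Literal port of B: [[sum(mat[r][:c+1]) for c in range(cols)] for r in range(rows)].
-- mat[r][:c+1] with nonnegative bound is exactly List.take (c+1); sum is a left fold from 0.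
def cumsum_matrix_alt (mat : List (List Int)) : List (List Int) :=
  let cols := (mat.headD []).length
  mat.map (fun row => (List.range cols).map (fun c => (row.take (c+1)).foldl (· + ·) 0))

-- ===== PRECONDITION & SPEC =====
-- Pre_ excludes exactly the inputs where Python A raises IndexError: the empty matrix
-- (len(mat[0])) and matrices with a row shorter than the first row (mat[r][c] out of range).
def Pre_cumsum_matrix (mat : List (List Int)) : Prop :=
  mat ≠ [] ∧ ∀ row ∈ mat, (mat.headD []).length ≤ row.length
instance (mat : List (List Int)) : Decidable (Pre_cumsum_matrix mat) := by
  unfold Pre_cumsum_matrix; infer_instance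
def pvWitness_cumsum_matrix : List (List Int) := [[1, 2, 3], [4, -5, 6]]

def Spec_cumsum_matrix (mat : List (List Int)) (out : List (List Int)) : Prop := out = cumsum_matrix_alt mat
instance (mat : List (List Int)) (out : List (List Int)) : Decidable (Spec_cumsum_matrix mat out) := by unfold Spec_cumsum_matrix; infer_instance

-- ===== CLAIM (what is proved, stated in full; the proofs are below) =====
def Claim_equal_cumsum_matrix : Prop := ∀ (mat : List (List Int)), Dom_cumsum_matrix mat → Pre_cumsum_matrix mat → Spec_cumsum_matrix mat (cumsum_matrix mat)

-- ===== LEMMAS AND PROOFS =====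

-- The B row built from a row of the matrix.
def pvBrow (cols : Nat) (row : List Int) : List Int :=
  (List.range cols).map (fun c => (row.take (c+1)).foldl (· + ·) 0)

-- Prefix sums step: sum of take (n+1) = sum of take n + getD n 0 (holds even past the end).
lemma pv_take_succ_sum (row : List Int) (n : Nat) :
    ((row.take (n+1)).foldl (· + ·) 0) = ((row.take n).foldl (· + ·) 0) + row.getD n 0 := by
  rw [List.take_add_one, List.foldl_append]
  rcases h : row[n]? with _ | v
  · simp [List.getD, h]
  · simp [List.getD, h]

-- The inner-loop invariant: after folding c = 0..n-1 starting from a zero row of length cols,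
-- the first n entries are the prefix sums and the rest are still 0.
lemma pv_inner (mrow : List Int) (cols : Nat) :
    ∀ n, n ≤ cols →
    (List.range n).foldl (fun s c => s.set c
        (if c ≠ 0 then s.getD (c-1) 0 + mrow.getD c 0 else mrow.getD c 0))
      (List.replicate cols (0 : Int))
    = (List.range n).map (fun c => ((mrow.take (c+1)).foldl (· + ·) 0))
        ++ List.replicate (cols - n) 0 := by
  intro n hn
  induction n with
  | zero => simp
  | succ n ih =>
    have hn' : n ≤ cols := Nat.le_of_succ_le hn
    rw [List.range_succ, List.foldl_append, List.map_append, ih hn']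
    simp only [List.foldl_cons, List.foldl_nil, List.map_cons, List.map_nil]
    have hlen : ((List.range n).map
        (fun c => ((mrow.take (c+1)).foldl (· + ·) 0))).length = n := by simp
    have hrep : cols - n = (cols - (n+1)) + 1 := by omega
    -- the value written at index n is the n-th prefix sum
    have hval :
        (if n ≠ 0 then
            (((List.range n).map (fun c => ((mrow.take (c+1)).foldl (· + ·) 0))
              ++ List.replicate (cols - n) (0 : Int)).getD (n-1) 0) + mrow.getD n 0
         else mrow.getD n 0)
        = ((mrow.take (n+1)).foldl (· + ·) 0) := by
      by_cases h0 : n = 0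
      · subst h0
        simp [pv_take_succ_sum mrow 0]
      · have hlt : n - 1 < n := by omega
        rw [if_pos h0]
        have : (((List.range n).map (fun c => ((mrow.take (c+1)).foldl (· + ·) 0))
              ++ List.replicate (cols - n) (0 : Int)).getD (n-1) 0)
            = ((mrow.take n).foldl (· + ·) 0) := by
          rw [List.getD_eq_getElem?_getD, List.getElem?_append_left (by omega),
              List.getElem?_map]
          simp [List.getElem?_range hlt, Nat.sub_add_cancel (Nat.one_le_iff_ne_zero.mpr h0)]
        rw [this, ← pv_take_succ_sum]
    rw [hval, List.set_append_right _ _ (by omega), hlen, Nat.sub_self, hrep]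
    simp only [List.replicate_succ, List.set_cons_zero]
    rw [List.append_assoc]
    simp


-- The inner fold only touches row r of cm: it factors through an update of that row.
lemma pv_commute (g : List Int → Nat → List Int) (r : Nat) :
    ∀ (l : List Nat) (cm : List (List Int)), r < cm.length →
    l.foldl (fun cm c => cm.set r (g (cm.getD r []) c)) cm
    = cm.set r (l.foldl g (cm.getD r [])) := by
  intro l
  induction l with
  | nil =>
    intro cm hr
    simp only [List.foldl_nil, List.getD_eq_getElem?_getD, List.getElem?_eq_getElem hr,
      Option.getD_some, List.set_getElem_self]
  | cons c l ih =>
    intro cm hr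
    simp only [List.foldl_cons]
    rw [ih _ (by simpa using hr)]
    have hget : ((cm.set r (g (cm.getD r []) c)).getD r []) = g (cm.getD r []) c := by
      rw [List.getD_eq_getElem?_getD, List.getElem?_set_self (by simpa using hr)]
      simp [List.getElem?_eq_getElem hr]
    rw [hget, List.set_set]

-- The outer-loop invariant: after processing rows 0..n-1, the first n rows are B rows
-- and the rest are still zero rows.
lemma pv_outer (mat : List (List Int)) (cols : Nat) :
    ∀ n, n ≤ mat.length →
    (List.range n).foldl (fun cm r =>
        (List.range cols).foldl (fun cm c =>
          cm.set r ((cm.getD r []).set c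
            (if c ≠ 0 then (cm.getD r []).getD (c-1) 0 + (mat.getD r []).getD c 0
             else (mat.getD r []).getD c 0))) cm)
      (List.replicate mat.length (List.replicate cols 0))
    = (mat.take n).map (pvBrow cols)
        ++ List.replicate (mat.length - n) (List.replicate cols 0) := by
  intro n hn
  induction n with
  | zero => simp
  | succ n ih =>
    have hn' : n ≤ mat.length := Nat.le_of_succ_le hn
    rw [List.range_succ, List.foldl_append, ih hn']
    simp only [List.foldl_cons, List.foldl_nil]
    set cm := (mat.take n).map (pvBrow cols)
        ++ List.replicate (mat.length - n) (List.replicate cols (0 : Int)) with hcm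
    have hcmlen : cm.length = mat.length := by
      simp [hcm, List.length_take, min_eq_left hn']; omega
    have hrlt : n < cm.length := by omega
    have hmaplen : ((mat.take n).map (pvBrow cols)).length = n := by
      simp [List.length_take, min_eq_left hn']
    have hgetr : cm.getD n [] = List.replicate cols (0 : Int) := by
      rw [hcm, List.getD_eq_getElem?_getD, List.getElem?_append_right (by omega), hmaplen,
          Nat.sub_self]
      have : 0 < mat.length - n := by omega
      simp [this]
    rw [pv_commute (fun s c => s.set c
          (if c ≠ 0 then s.getD (c-1) 0 + (mat.getD n []).getD c 0
           else (mat.getD n []).getD c 0)) n (List.range cols) cm hrlt,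
        hgetr, pv_inner (mat.getD n []) cols cols (le_refl _)]
    simp only [Nat.sub_self, List.replicate_zero, List.append_nil]
    have hrep : mat.length - n = (mat.length - (n+1)) + 1 := by omega
    rw [hcm, List.set_append_right _ _ (by omega), hmaplen, Nat.sub_self, hrep]
    simp only [List.replicate_succ, List.set_cons_zero]
    have htake : mat.take (n+1) = mat.take n ++ [mat.getD n []] := by
      rw [List.take_add_one]
      congr 1
      rw [List.getD_eq_getElem?_getD, List.getElem?_eq_getElem (by omega)]
      simp
    rw [htake, List.map_append, List.append_assoc]
    rfl

-- ===== VERDICT (by name: the statement is the Claim_ definition above) =====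
theorem cumsum_matrix_spec : Claim_equal_cumsum_matrix := by
  intro mat _ _
  unfold Spec_cumsum_matrix cumsum_matrix cumsum_matrix_alt
  simp only []
  rw [pv_outer mat (mat.headD []).length mat.length (le_refl _)]
  simp [pvBrow, List.take_length]
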